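-- pv_equiv track=rewrite | github.com/jimbo-p/AoC24 | day3.py | remove_dont_do_instructions
-- ===== SOURCE A (Python) =====
-- def remove_dont_do_instructions(text):
--     result = []
--     i = 0
--     while i < len(text):
--         if text[i:i+6] == "don't(":
--             # Skip past "don't()"
--             i += 6
--             # Skip characters until "do()" is found
--             while i < len(text) and text[i:i+3] != "do(":
--                 i += 1
--         elif text[i:i+3] == "do(":
--             # Append "do()" to the result
--             result.append("do()")
--             # Skip past "do()"
--             i += 3
--         else:
--             # Append current character to the result
--             result.append(text[i])
--             i += 1
--     return ''.join(result)
-- ===== SOURCE B (Python) =====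
-- def remove_dont_do_instructions(text):
--     # Pass 1: delete each "don't(" together with everything up to (but not
--     # including) the next "do(", or to the end of the string if there is none.
--     kept = []
--     i = 0
--     while True:
--         j = text.find("don't(", i)
--         if j == -1:
--             kept.append(text[i:])
--             break
--         kept.append(text[i:j])
--         k = text.find("do(", j + 6)
--         if k == -1:
--             break
--         i = k
--     # Pass 2: rewrite every remaining "do(" as "do()".
--     return ''.join(kept).replace("do(", "do()")
-- ===== Notes on version B (the rewrite author's own statement) =====
-- stated objective: faster
-- what changed: B replaces A's one-pass character state machine (index walk with per-character slice comparisons and appends) by two whole-string library passes: str.find-driven stripping of each don't(...-region and then a single global str.replace of "do(" by "do()".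
import Mathlib
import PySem

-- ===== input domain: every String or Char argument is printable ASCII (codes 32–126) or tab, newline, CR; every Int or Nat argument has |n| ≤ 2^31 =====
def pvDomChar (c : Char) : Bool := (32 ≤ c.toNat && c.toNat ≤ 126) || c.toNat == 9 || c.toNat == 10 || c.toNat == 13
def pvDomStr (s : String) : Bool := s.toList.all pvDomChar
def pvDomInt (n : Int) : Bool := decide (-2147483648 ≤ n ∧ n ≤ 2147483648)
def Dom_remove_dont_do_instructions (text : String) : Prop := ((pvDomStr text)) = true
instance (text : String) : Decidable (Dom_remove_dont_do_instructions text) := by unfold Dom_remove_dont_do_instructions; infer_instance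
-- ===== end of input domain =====

-- B replaces A's one-pass character state machine by two library passes (find-based
-- stripping of the skip regions, then a global replace of "do(" by "do()"); same output.

-- The string literals both programs use, as character lists.
def pvDONT : List Char := ['d', 'o', 'n', '\'', 't', '(']
def pvDO : List Char := ['d', 'o', '(']
def pvDOP : List Char := ['d', 'o', '(', ')']

-- ===== PORT A =====
-- measure facts cited by the loops' decreasing_by clauses
theorem pv_dec1 (n i : Nat) (h : i < n) : n - (i + 1) < n - i := by omega

theorem pv_dec3 (n i : Nat) (h : i < n) : n - (i + 3) < n - i := by omega

-- inner while loop of A: advance i until "do(" starts at i or the text ends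
def skipA (t : List Char) (i : Nat) : Nat :=
  if i < t.length ∧ PySem.List.slice t (some (i : Int)) (some ((i : Int) + 3)) ≠ pvDO then
    skipA t (i + 1)
  else i
termination_by t.length - i
decreasing_by rename_i h; exact pv_dec1 t.length i h.1

-- skipA never moves left (needed by goA's termination, cited there by name)
theorem skipA_ge (t : List Char) (i : Nat) : i ≤ skipA t i := by
  fun_induction skipA t i <;> omega

theorem pv_decSkip (t : List Char) (i : Nat) (h : i < t.length) :
    t.length - skipA t (i + 6) < t.length - i := by
  have := skipA_ge t (i + 6); omega

-- A's index i is a Python int that stays ≥ 0; it is carried as a Nat (exact here).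
def goA (t : List Char) (i : Nat) (result : List (List Char)) : List (List Char) :=
  if h : i < t.length then
    if PySem.List.slice t (some (i : Int)) (some ((i : Int) + 6)) = pvDONT then
      goA t (skipA t (i + 6)) result
    else if PySem.List.slice t (some (i : Int)) (some ((i : Int) + 3)) = pvDO then
      goA t (i + 3) (result ++ [pvDOP])
    else
      goA t (i + 1) (result ++ [[t[i]]])
  else result
termination_by t.length - i
decreasing_by
  · exact pv_decSkip t i h
  · exact pv_dec3 t.length i h
  · exact pv_dec1 t.length i h

def remove_dont_do_instructions (text : String) : String :=
  String.ofList (PySem.Chars.join [] (goA text.toList 0 []))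

-- ===== PORT B =====
-- bounds of a successful text.find(sub, a): result ≥ a and the hit fits inside t
theorem pv_findFrom_bounds (t sub : List Char) (a : Nat) (hsub : sub ≠ [])
    (h : PySem.Chars.findFrom t sub (a : Int) none ≠ -1) :
    (a : Int) ≤ PySem.Chars.findFrom t sub (a : Int) none ∧
      (PySem.Chars.findFrom t sub (a : Int) none).toNat + sub.length ≤ t.length := by
  by_cases ha : a ≤ t.length
  · obtain ⟨h1, h2, _⟩ := PySem.Chars.findFrom_natCast_spec t sub a ha h
    refine ⟨h1, ?_⟩
    have hlen := h2.length_le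
    have hs : sub.length ≥ 1 := List.length_pos_of_ne_nil hsub
    simp [List.length_drop] at hlen
    omega
  · exfalso; apply h
    simp only [PySem.Chars.findFrom]
    have hlt : (t.length : Int) < (a : Int) := by exact_mod_cast Nat.lt_of_not_le (fun hc => ha hc)
    have hb : ¬ ((a : Int) < 0) := by omega
    simp only [hb, if_false]
    omega

-- measure fact for stripGo's recursive call (cited in its decreasing_by)
theorem stripGo_dec (t : List Char) (i : Nat)
    (hj : PySem.Chars.findFrom t pvDONT (i : Int) none ≠ -1)
    (hk : PySem.Chars.findFrom t pvDO (PySem.Chars.findFrom t pvDONT (i : Int) none + 6) none ≠ -1) :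
    t.length - (PySem.Chars.findFrom t pvDO (PySem.Chars.findFrom t pvDONT (i : Int) none + 6) none).toNat < t.length - i := by
  have h1 := pv_findFrom_bounds t pvDONT i (by decide) hj
  have hj6 : PySem.Chars.findFrom t pvDONT (i : Int) none + 6
      = (((PySem.Chars.findFrom t pvDONT (i : Int) none).toNat + 6 : Nat) : Int) := by omega
  rw [hj6] at hk ⊢
  have h2 := pv_findFrom_bounds t pvDO ((PySem.Chars.findFrom t pvDONT (i : Int) none).toNat + 6) (by decide) hk
  have e1 : pvDONT.length = 6 := rfl
  have e2 : pvDO.length = 3 := rfl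
  rw [e1] at h1
  rw [e2] at h2
  omega

-- B's pass-1 loop; Python's locals j and k are inlined, i (a Python int, always ≥ 0
-- here) is carried as a Nat (exact).
def stripGo (t : List Char) (i : Nat) (kept : List (List Char)) : List (List Char) :=
  if hj : PySem.Chars.findFrom t pvDONT (i : Int) none = -1 then
    kept ++ [PySem.List.slice t (some (i : Int)) none]
  else
    if hk : PySem.Chars.findFrom t pvDO (PySem.Chars.findFrom t pvDONT (i : Int) none + 6) none = -1 then
      kept ++ [PySem.List.slice t (some (i : Int)) (some (PySem.Chars.findFrom t pvDONT (i : Int) none))]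
    else
      stripGo t (PySem.Chars.findFrom t pvDO (PySem.Chars.findFrom t pvDONT (i : Int) none + 6) none).toNat
        (kept ++ [PySem.List.slice t (some (i : Int)) (some (PySem.Chars.findFrom t pvDONT (i : Int) none))])
termination_by t.length - i
decreasing_by exact stripGo_dec t i hj hk

def remove_dont_do_instructions_alt (text : String) : String :=
  String.ofList (PySem.Chars.replace (PySem.Chars.join [] (stripGo text.toList 0 [])) pvDO pvDOP)

-- ===== PRECONDITION & SPEC =====
def Spec_remove_dont_do_instructions (text : String) (out : String) : Prop := out = remove_dont_do_instructions_alt text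
instance (text : String) (out : String) : Decidable (Spec_remove_dont_do_instructions text out) := by unfold Spec_remove_dont_do_instructions; infer_instance

-- ===== CLAIM (what is proved, stated in full; the proofs are below) =====
def Claim_equal_remove_dont_do_instructions : Prop := ∀ (text : String), Dom_remove_dont_do_instructions text → Spec_remove_dont_do_instructions text (remove_dont_do_instructions text)

-- ===== LEMMAS AND PROOFS =====

-- reference one-pass formulation both ports are reduced to:
-- dropUntil u = the suffix of u from its first occurrence of "do(" ([] if none)
def dropUntil : List Char → List Char
  | [] => []
  | c :: rest => if pvDO.isPrefixOf (c :: rest) then c :: rest else dropUntil rest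

theorem dropUntil_length_le (u : List Char) : (dropUntil u).length ≤ u.length := by
  induction u with
  | nil => simp [dropUntil]
  | cons c rest ih => rw [dropUntil]; split <;> simp <;> try omega

theorem pv_decTail (c : Char) (rest : List Char) : rest.length < (c :: rest).length := by
  simp

theorem pv_decStripDU (c : Char) (rest : List Char) :
    (dropUntil ((c :: rest).drop 6)).length < (c :: rest).length := by
  have h1 := dropUntil_length_le ((c :: rest).drop 6)
  simp at h1 ⊢
  omega

theorem pv_decDrop3 (c : Char) (rest : List Char) :
    ((c :: rest).drop 3).length < (c :: rest).length := by
  simp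

-- strip u = u with every "don't(…" skip region removed (keeping the closing "do(")
def strip : List Char → List Char
  | [] => []
  | c :: rest =>
    if pvDONT.isPrefixOf (c :: rest) then strip (dropUntil ((c :: rest).drop 6))
    else c :: strip rest
termination_by u => u.length
decreasing_by
  · exact pv_decStripDU c rest
  · exact pv_decTail c rest

-- repl u = u with every "do(" rewritten to "do()"
def repl : List Char → List Char
  | [] => []
  | c :: rest =>
    if pvDO.isPrefixOf (c :: rest) then pvDOP ++ repl ((c :: rest).drop 3)
    else c :: repl rest
termination_by u => u.length
decreasing_by
  · exact pv_decDrop3 c rest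
  · exact pv_decTail c rest

-- bridges between A's slice tests and prefix predicates
theorem slice3_eq (t : List Char) (i : Nat) :
    PySem.List.slice t (some (i : Int)) (some ((i : Int) + 3)) = (t.drop i).take 3 := by
  simpa using PySem.List.slice_natCast_add t i 3

theorem slice6_eq (t : List Char) (i : Nat) :
    PySem.List.slice t (some (i : Int)) (some ((i : Int) + 6)) = (t.drop i).take 6 := by
  simpa using PySem.List.slice_natCast_add t i 6

theorem take3_pvDO_iff (u : List Char) : u.take 3 = pvDO ↔ pvDO <+: u := by
  rw [List.prefix_iff_eq_take, show pvDO.length = 3 from rfl]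
  exact ⟨fun h => h.symm, fun h => h.symm⟩

theorem take6_pvDONT_iff (u : List Char) : u.take 6 = pvDONT ↔ pvDONT <+: u := by
  rw [List.prefix_iff_eq_take, show pvDONT.length = 6 from rfl]
  exact ⟨fun h => h.symm, fun h => h.symm⟩

theorem dropUntil_shape (v : List Char) :
    dropUntil v = [] ∨ pvDO.isPrefixOf (dropUntil v) = true := by
  induction v with
  | nil => left; rfl
  | cons c rest ih =>
    rw [dropUntil]
    split
    · right; assumption
    · exact ih

theorem strip_cons_head (u : List Char) (a : Char) (w : List Char)
    (h : strip u = a :: w) (ha : a ≠ 'd') : ∃ u', u = a :: u' ∧ strip u' = w := by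
  cases u with
  | nil => simp [strip] at h
  | cons c rest =>
    rw [strip] at h
    split_ifs at h with hp
    · exfalso
      rcases dropUntil_shape ((c :: rest).drop 6) with hsh | hsh
      · rw [hsh] at h; simp [strip] at h
      · obtain ⟨w0, hw0⟩ := List.isPrefixOf_iff_prefix.mp hsh
        rw [← hw0] at h
        rw [show pvDO ++ w0 = 'd' :: 'o' :: '(' :: w0 from rfl] at h
        rw [strip, if_neg (by simp [pvDONT, List.isPrefixOf])] at h
        exact ha (by injection h with h1 _; exact h1.symm)
    · injection h with h1 h2
      exact ⟨rest, by rw [h1], h2⟩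

theorem skipA_dropUntil (t : List Char) (k : Nat) :
    dropUntil (t.drop k) = t.drop (skipA t k) := by
  fun_induction skipA t k with
  | case1 k hcond ih =>
    obtain ⟨hk, hne⟩ := hcond
    rw [slice3_eq, Ne, take3_pvDO_iff] at hne
    rw [List.drop_eq_getElem_cons hk, dropUntil, if_neg (by
      rw [List.isPrefixOf_iff_prefix, ← List.drop_eq_getElem_cons hk]; exact hne)]
    exact ih
  | case2 k hcond =>
    rcases Decidable.not_and_iff_not_or_not.mp hcond with hk | hne
    · rw [List.drop_eq_nil_of_le (by omega)]
      simp [dropUntil]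
    · rw [not_not, slice3_eq, take3_pvDO_iff] at hne
      obtain ⟨w, hw⟩ := hne
      rw [← hw]
      show dropUntil ('d' :: 'o' :: '(' :: w) = 'd' :: 'o' :: '(' :: w
      rw [dropUntil, if_pos (by rw [List.isPrefixOf_iff_prefix]; exact ⟨w, rfl⟩)]

theorem goA_flatten (t : List Char) (i : Nat) (res : List (List Char)) :
    (goA t i res).flatten = res.flatten ++ repl (strip (t.drop i)) := by
  fun_induction goA t i res with
  | case1 i res h hdont ih =>
    rw [ih]
    rw [slice6_eq, take6_pvDONT_iff] at hdont
    obtain ⟨w, hw⟩ := hdont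
    have hw6 : w = t.drop (i + 6) := by
      have := congrArg (List.drop 6) hw
      simpa [List.drop_drop, show pvDONT.length = 6 from rfl] using this
    rw [show t.drop i = 'd'::'o'::'n'::'\''::'t'::'('::w by rw [← hw]; rfl]
    rw [strip, if_pos (by rw [List.isPrefixOf_iff_prefix]; exact ⟨w, rfl⟩)]
    rw [show ('d'::'o'::'n'::'\''::'t'::'('::w).drop 6 = w from rfl, hw6, skipA_dropUntil]
  | case2 i res h hne6 hdo ih =>
    rw [ih]
    rw [slice3_eq, take3_pvDO_iff] at hdo
    obtain ⟨w, hw⟩ := hdo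
    have hw3 : w = t.drop (i + 3) := by
      have := congrArg (List.drop 3) hw
      simpa [List.drop_drop, show pvDO.length = 3 from rfl] using this
    rw [show t.drop i = 'd'::'o'::'('::w by rw [← hw]; rfl]
    rw [strip, if_neg (by simp [pvDONT, List.isPrefixOf])]
    rw [strip, if_neg (by simp [pvDONT, List.isPrefixOf])]
    rw [strip, if_neg (by simp [pvDONT, List.isPrefixOf])]
    rw [repl, if_pos (by rw [List.isPrefixOf_iff_prefix]; exact ⟨_, rfl⟩)]
    rw [show ('d'::'o'::'('::strip w).drop 3 = strip w from rfl, hw3]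
    simp [List.flatten_append, pvDOP]
  | case3 i res h hne6 hne3 ih =>
    rw [ih]
    have hcons : t.drop i = t[i] :: t.drop (i + 1) := List.drop_eq_getElem_cons h
    rw [slice6_eq, take6_pvDONT_iff] at hne6
    rw [slice3_eq, take3_pvDO_iff] at hne3
    rw [hcons, strip, if_neg (by
      rw [List.isPrefixOf_iff_prefix, ← hcons]
      exact hne6)]
    rw [repl, if_neg (by
      rw [List.isPrefixOf_iff_prefix]
      rintro ⟨w0, hw0⟩
      rw [show pvDO ++ w0 = 'd'::'o'::'('::w0 from rfl] at hw0
      apply hne3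
      have hd : t[i] = 'd' := by injection hw0 with h1 _; exact h1.symm
      have hs : strip (t.drop (i + 1)) = 'o'::'('::w0 := by injection hw0 with _ h2; exact h2.symm
      obtain ⟨u1, hu1, hsu1⟩ := strip_cons_head _ _ _ hs (by decide)
      obtain ⟨u2, hu2, _⟩ := strip_cons_head _ _ _ hsu1 (by decide)
      refine ⟨u2, ?_⟩
      rw [hcons, hd, hu1, hu2]
      rfl)]
    simp [List.flatten_append]
  | case4 i res h =>
    rw [List.drop_eq_nil_of_le (by omega)]
    rw [strip, repl]
    simp

theorem strip_no_dont (u : List Char) (h : ¬ pvDONT <:+: u) : strip u = u := by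
  induction u with
  | nil => rw [strip]
  | cons c rest ih =>
    rw [strip, if_neg (by
      rw [List.isPrefixOf_iff_prefix]
      exact fun hp => h hp.isInfix)]
    rw [ih (fun hm => h (List.infix_cons hm))]

theorem strip_until (t : List Char) (a b : Nat) (hab : a ≤ b) (hb : b ≤ t.length)
    (hno : ∀ m, a ≤ m → m < b → ¬ pvDONT <+: t.drop m) :
    strip (t.drop a) = (t.drop a).take (b - a) ++ strip (t.drop b) := by
  induction hd : b - a generalizing a with
  | zero =>
    have : a = b := by omega
    subst this
    simp
  | succ n ih =>
    have ha : a < t.length := by omega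
    rw [List.drop_eq_getElem_cons ha]
    rw [strip, if_neg (by
      rw [List.isPrefixOf_iff_prefix, ← List.drop_eq_getElem_cons ha]
      exact hno a le_rfl (by omega))]
    rw [List.take_succ_cons]
    rw [ih (a + 1) (by omega) (fun m hm1 hm2 => hno m (by omega) hm2) (by omega)]
    simp

theorem dropUntil_no_do (u : List Char) (h : ¬ pvDO <:+: u) : dropUntil u = [] := by
  induction u with
  | nil => rfl
  | cons c rest ih =>
    rw [dropUntil, if_neg (by
      rw [List.isPrefixOf_iff_prefix]
      exact fun hp => h hp.isInfix)]
    exact ih (fun hm => h (List.infix_cons hm))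

theorem dropUntil_first (t : List Char) (a b : Nat) (hab : a ≤ b)
    (hb : pvDO <+: t.drop b)
    (hno : ∀ m, a ≤ m → m < b → ¬ pvDO <+: t.drop m) :
    dropUntil (t.drop a) = t.drop b := by
  obtain ⟨w, hw⟩ := hb
  have hblen : b < t.length := by
    have := hw ▸ (List.length_drop (l := t) (i := b))
    simp [pvDO] at this
    omega
  induction hd : b - a generalizing a with
  | zero =>
    have : a = b := by omega
    subst this
    rw [← hw]
    show dropUntil ('d' :: 'o' :: '(' :: w) = 'd' :: 'o' :: '(' :: w
    rw [dropUntil, if_pos (by rw [List.isPrefixOf_iff_prefix]; exact ⟨w, rfl⟩)]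
  | succ n ih =>
    have ha : a < t.length := by omega
    rw [List.drop_eq_getElem_cons ha, dropUntil, if_neg (by
      rw [List.isPrefixOf_iff_prefix, ← List.drop_eq_getElem_cons ha]
      exact hno a le_rfl (by omega))]
    exact ih (a + 1) (by omega) (fun m hm1 hm2 => hno m (by omega) hm2) (by omega)

theorem stripGo_flatten (t : List Char) (i : Nat) (kept : List (List Char))
    (hi : i ≤ t.length) :
    (stripGo t i kept).flatten = kept.flatten ++ strip (t.drop i) := by
  revert hi
  fun_induction stripGo t i kept with
  | case1 i kept hj =>
    intro hi
    have hfind : PySem.Chars.find (t.drop i) pvDONT = -1 := by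
      rw [PySem.Chars.findFrom_natCast t pvDONT i hi] at hj
      by_cases hf : PySem.Chars.find (t.drop i) pvDONT = -1
      · exact hf
      · exfalso; rw [if_neg hf] at hj
        have := PySem.Chars.neg_one_le_find (t.drop i) pvDONT
        omega
    rw [strip_no_dont _ ((PySem.Chars.find_eq_neg_one_iff _ _).mp hfind)]
    rw [PySem.List.slice_from_natCast]
    simp [List.flatten_append]
  | case2 i kept hj hk =>
    intro hi
    obtain ⟨hj1, hj2, hj3⟩ := PySem.Chars.findFrom_natCast_spec t pvDONT i hi hj
    obtain ⟨w, hw⟩ := hj2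
    have hwlen := congrArg List.length hw
    simp [show pvDONT.length = 6 from rfl] at hwlen
    have hjn : i ≤ (PySem.Chars.findFrom t pvDONT (i : Int) none).toNat := by omega
    have hjlen : (PySem.Chars.findFrom t pvDONT (i : Int) none).toNat + 6 ≤ t.length := by omega
    have hw6 : w = t.drop ((PySem.Chars.findFrom t pvDONT (i : Int) none).toNat + 6) := by
      have := congrArg (List.drop 6) hw
      simpa [List.drop_drop, show pvDONT.length = 6 from rfl] using this
    have hj6 : PySem.Chars.findFrom t pvDONT (i : Int) none + 6
        = (((PySem.Chars.findFrom t pvDONT (i : Int) none).toNat + 6 : Nat) : Int) := by omega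
    rw [hj6] at hk
    have hfind2 : PySem.Chars.find (t.drop ((PySem.Chars.findFrom t pvDONT (i : Int) none).toNat + 6)) pvDO = -1 := by
      rw [PySem.Chars.findFrom_natCast t pvDO _ hjlen] at hk
      by_cases hf : PySem.Chars.find (t.drop ((PySem.Chars.findFrom t pvDONT (i : Int) none).toNat + 6)) pvDO = -1
      · exact hf
      · exfalso; rw [if_neg hf] at hk
        have := PySem.Chars.neg_one_le_find (t.drop ((PySem.Chars.findFrom t pvDONT (i : Int) none).toNat + 6)) pvDO
        omega
    have hdu : dropUntil (t.drop ((PySem.Chars.findFrom t pvDONT (i : Int) none).toNat + 6)) = [] :=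
      dropUntil_no_do _ ((PySem.Chars.find_eq_neg_one_iff _ _).mp hfind2)
    have hsj : strip (t.drop (PySem.Chars.findFrom t pvDONT (i : Int) none).toNat) = [] := by
      rw [show t.drop (PySem.Chars.findFrom t pvDONT (i : Int) none).toNat
            = 'd'::'o'::'n'::'\''::'t'::'('::w by rw [← hw]; rfl]
      rw [strip, if_pos (by rw [List.isPrefixOf_iff_prefix]; exact ⟨w, rfl⟩)]
      rw [show ('d'::'o'::'n'::'\''::'t'::'('::w).drop 6 = w from rfl, hw6, hdu]
      rw [strip]
    rw [strip_until t i (PySem.Chars.findFrom t pvDONT (i : Int) none).toNat hjn (by omega) hj3]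
    rw [hsj]
    rw [show PySem.Chars.findFrom t pvDONT (i : Int) none
        = (((PySem.Chars.findFrom t pvDONT (i : Int) none).toNat : Nat) : Int) by omega,
      PySem.List.slice_natCast]
    simp [List.flatten_append]
    omega
  | case3 i kept hj hk ih =>
    intro hi
    obtain ⟨hj1, hj2, hj3⟩ := PySem.Chars.findFrom_natCast_spec t pvDONT i hi hj
    obtain ⟨w, hw⟩ := hj2
    have hwlen := congrArg List.length hw
    simp [show pvDONT.length = 6 from rfl] at hwlen
    have hjn : i ≤ (PySem.Chars.findFrom t pvDONT (i : Int) none).toNat := by omega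
    have hjlen : (PySem.Chars.findFrom t pvDONT (i : Int) none).toNat + 6 ≤ t.length := by omega
    have hw6 : w = t.drop ((PySem.Chars.findFrom t pvDONT (i : Int) none).toNat + 6) := by
      have := congrArg (List.drop 6) hw
      simpa [List.drop_drop, show pvDONT.length = 6 from rfl] using this
    have hj6 : PySem.Chars.findFrom t pvDONT (i : Int) none + 6
        = (((PySem.Chars.findFrom t pvDONT (i : Int) none).toNat + 6 : Nat) : Int) := by omega
    rw [hj6] at hk ih ⊢
    obtain ⟨hk1, hk2, hk3⟩ := PySem.Chars.findFrom_natCast_spec t pvDO _ hjlen hk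
    have hklen := hk2.length_le
    rw [List.length_drop, show pvDO.length = 3 from rfl] at hklen
    rw [ih (by omega)]
    have hdu : dropUntil (t.drop ((PySem.Chars.findFrom t pvDONT (i : Int) none).toNat + 6))
        = t.drop (PySem.Chars.findFrom t pvDO
            (((PySem.Chars.findFrom t pvDONT (i : Int) none).toNat + 6 : Nat) : Int) none).toNat :=
      dropUntil_first t _ _ (by omega) hk2 hk3
    have hsj : strip (t.drop (PySem.Chars.findFrom t pvDONT (i : Int) none).toNat)
        = strip (t.drop (PySem.Chars.findFrom t pvDO
            (((PySem.Chars.findFrom t pvDONT (i : Int) none).toNat + 6 : Nat) : Int) none).toNat) := by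
      rw [show t.drop (PySem.Chars.findFrom t pvDONT (i : Int) none).toNat
            = 'd'::'o'::'n'::'\''::'t'::'('::w by rw [← hw]; rfl]
      rw [strip, if_pos (by rw [List.isPrefixOf_iff_prefix]; exact ⟨w, rfl⟩)]
      rw [show ('d'::'o'::'n'::'\''::'t'::'('::w).drop 6 = w from rfl, hw6, hdu]
    rw [strip_until t i (PySem.Chars.findFrom t pvDONT (i : Int) none).toNat hjn (by omega) hj3]
    rw [hsj]
    rw [show PySem.Chars.findFrom t pvDONT (i : Int) none
        = (((PySem.Chars.findFrom t pvDONT (i : Int) none).toNat : Nat) : Int) by omega,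
      PySem.List.slice_natCast]
    simp [List.flatten_append]
    omega

theorem replace_go_eq (fuel : Nat) (l acc : List Char) (hl : l.length ≤ fuel) :
    PySem.Chars.replace.go pvDO pvDOP fuel l acc = acc.reverse ++ repl l := by
  induction fuel generalizing l acc with
  | zero =>
    have : l = [] := by cases l <;> simp_all
    subst this
    simp [PySem.Chars.replace.go, repl]
  | succ n ih =>
    cases l with
    | nil => simp [PySem.Chars.replace.go, repl]
    | cons c rest =>
      rw [PySem.Chars.replace.go]
      split
      · next hp =>
        rw [ih _ _ (by simp [pvDO] at hl ⊢; omega)]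
        rw [repl, if_pos hp]
        simp [show pvDO.length = 3 from rfl]
      · next hp =>
        rw [ih _ _ (by simp at hl ⊢; omega)]
        rw [repl, if_neg hp]
        simp

theorem replace_eq_repl (u : List Char) :
    PySem.Chars.replace u pvDO pvDOP = repl u := by
  rw [PySem.Chars.replace, if_neg (by simp [pvDO])]
  simpa using replace_go_eq u.length u [] le_rfl

theorem join_nil_flatten (parts : List (List Char)) :
    PySem.Chars.join [] parts = parts.flatten := by
  induction parts with
  | nil => simp [PySem.Chars.join, List.intercalate]
  | cons x xs ih =>
    simp [PySem.Chars.join, List.intercalate] at *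
    cases xs <;> simp_all [List.intersperse]

-- ===== VERDICT (by name: the statement is the Claim_ definition above) =====
theorem remove_dont_do_instructions_spec : Claim_equal_remove_dont_do_instructions := by
  intro text _
  unfold Spec_remove_dont_do_instructions remove_dont_do_instructions remove_dont_do_instructions_alt
  rw [join_nil_flatten, join_nil_flatten, goA_flatten, stripGo_flatten _ _ _ (Nat.zero_le _),
    replace_eq_repl]
  simp
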